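-- pv_equiv track=rewrite | github.com/MohamedKeteb/Projet_graph_py | delivery_network/graph.py | min_power_tree
-- ===== SOURCE A (Python) =====
-- def min_power_tree(src, dest, tree):
--     src_ancestors = []
--     curr = src
--     while curr != 1: # on récupère les ancêtres de src
--         src_ancestors.append([curr, tree[curr][0][1]])
--         curr = tree[curr][0][0]
--     src_ancestors.append([1, 0])
--     dest_ancestors = []
--     curr = dest
--     while curr != 1: # on récupère les ancêtres de dest
--         dest_ancestors.append([curr, tree[curr][0][1]])
--         curr = tree[curr][0][0]
--     dest_ancestors.append([1, 0])
--
--     # Trouver l'indice du premier ancêtre commun entre src et dest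
--     i = len(src_ancestors) - 1
--     j = len(dest_ancestors) - 1
--     while i >= 0 and j >= 0 and src_ancestors[i][0] == dest_ancestors[j][0]:
--         i -= 1
--         j -= 1
--
--     # Concaténer les chemins de src et dest jusqu'à l'ancêtre commun
--     path = src_ancestors[:i+2]
--     path[i+1][1] = 0
--     path.extend(reversed(dest_ancestors[:j+1]))
--
--     return max([x[1] for x in path]), [x[0] for x in path]
-- ===== SOURCE B (Python) =====
-- def min_power_tree(src, dest, tree):
--     # walk src up to the root, remembering each chain node's position
--     up = []
--     pos = {}
--     curr = src
--     while curr != 1: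
--         pos[curr] = len(up)
--         up.append((curr, tree[curr][0][1]))
--         curr = tree[curr][0][0]
--     pos[1] = len(up)
--     up.append((1, 0))
--     # walk dest up, stopping at the first node already on src's chain: the LCA
--     down = []
--     curr = dest
--     while curr not in pos:
--         down.append((curr, tree[curr][0][1]))
--         curr = tree[curr][0][0]
--     k = pos[curr]
--     nodes = [n for n, _ in up[:k + 1]] + [n for n, _ in reversed(down)]
--     power = max([w for _, w in up[:k]] + [w for _, w in down] + [0])
--     return power, nodes
-- ===== Notes on version B (the rewrite author's own statement) =====
-- stated objective: alternative
-- what changed: B replaces A's second full root-walk plus backwards positional comparison of the two complete ancestor chains with a hash-indexed early-stopping walk: src's chain is recorded in a node->position dict, and the dest walk stops at the first node already on src's chain (the LCA), so no chain suffixes are ever compared.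
import Mathlib
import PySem

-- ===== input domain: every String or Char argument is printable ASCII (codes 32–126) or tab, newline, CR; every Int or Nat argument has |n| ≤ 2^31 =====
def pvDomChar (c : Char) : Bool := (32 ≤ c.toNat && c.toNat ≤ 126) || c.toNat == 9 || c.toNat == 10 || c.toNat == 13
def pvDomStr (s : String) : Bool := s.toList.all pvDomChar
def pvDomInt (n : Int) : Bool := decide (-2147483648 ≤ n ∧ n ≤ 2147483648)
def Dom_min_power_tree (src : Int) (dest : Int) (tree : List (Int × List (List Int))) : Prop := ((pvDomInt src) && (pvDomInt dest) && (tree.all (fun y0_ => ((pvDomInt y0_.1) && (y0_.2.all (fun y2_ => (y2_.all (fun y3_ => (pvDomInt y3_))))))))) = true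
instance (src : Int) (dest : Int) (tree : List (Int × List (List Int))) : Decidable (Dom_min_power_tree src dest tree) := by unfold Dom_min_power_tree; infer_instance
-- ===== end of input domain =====

-- B replaces A's backwards positional comparison of the two full root chains by a dict-indexed,
-- early-stopping dest walk (stop at the first node already on src's chain); same cost class ("alternative").

-- ===== PORT A =====
-- tree is a Python dict built from (key, value) pairs: a later pair overwrites an earlier one,
-- so dict lookup is the LAST matching pair (exact model of dict(tree)[k]).
def pvLookup (tree : List (Int × List (List Int))) (k : Int) : Option (List (List Int)) :=
  (tree.reverse.find? (fun kv => kv.1 == k)).map Prod.snd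

-- tree[curr][0][0] and tree[curr][0][1]; none exactly where Python raises KeyError/IndexError
def pvPar (tree : List (Int × List (List Int))) (c : Int) : Option (Int × Int) :=
  match pvLookup tree c with
  | none => none
  | some rows =>
    match PySem.List.pyGet? rows 0 with
    | none => none
    | some row =>
      match PySem.List.pyGet? row 0, PySem.List.pyGet? row 1 with
      | some p, some w => some (p, w)
      | _, _ => none

-- the 'while curr != 1' ancestor loop of A (fuel only makes it total; never exhausted under Pre_)
def pvWalkA (tree : List (Int × List (List Int))) : Nat → Int → List (Int × Int)
  | fuel, curr =>
    if curr = 1 then [(1, 0)]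
    else
      match fuel with
      | 0 => [(1, 0)]            -- fuel guard; never reached under Pre_
      | fuel + 1 =>
        match pvPar tree curr with
        | none => [(1, 0)]       -- Python raises here; outside Pre_
        | some pw => (curr, pw.2) :: pvWalkA tree fuel pw.1

-- the backwards 'while i >= 0 and j >= 0 and ...' comparison loop of A
def pvScanA (S D : List (Int × Int)) : Nat → Int → Int → Int × Int
  | 0, i, j => (i, j)
  | fuel + 1, i, j =>
    if 0 ≤ i ∧ 0 ≤ j then
      match PySem.List.pyGet? S i, PySem.List.pyGet? D j with
      | some a, some b => if a.1 = b.1 then pvScanA S D fuel (i - 1) (j - 1) else (i, j)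
      | _, _ => (i, j)           -- IndexError; never reached (both indices start in range)
    else (i, j)

def min_power_tree (src : Int) (dest : Int) (tree : List (Int × List (List Int))) : Int × List Int :=
  let S := pvWalkA tree (tree.length + 1) src
  let D := pvWalkA tree (tree.length + 1) dest
  let ij := pvScanA S D (S.length + 1) ((S.length : Int) - 1) ((D.length : Int) - 1)
  let path0 := PySem.List.slice S none (some (ij.1 + 2))
  let path1 :=
    match PySem.List.pyGet? path0 (ij.1 + 1) with
    | some nw => PySem.List.pySetD path0 (ij.1 + 1) (nw.1, 0)   -- path[i+1][1] = 0
    | none => path0              -- IndexError; outside Pre_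
  let path := path1 ++ (PySem.List.slice D none (some (ij.2 + 1))).reverse
  match PySem.List.max? (path.map Prod.snd) (fun y => y) with
  | some m => (m, path.map Prod.fst)
  | none => (0, path.map Prod.fst)   -- max([]) raises; never reached (path is never empty)

-- ===== PORT B =====
-- src walk of Source B: also records each chain node's position in the dict pos
def pvWalkB (tree : List (Int × List (List Int))) :
    Nat → Int → List (Int × Int) → PySem.Dict Int Int → List (Int × Int) × PySem.Dict Int Int
  | fuel, curr, up, pos =>
    if curr = 1 then (up ++ [(1, 0)], pos.insert 1 (up.length : Int))
    else
      match fuel with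
      | 0 => (up ++ [(1, 0)], pos.insert 1 (up.length : Int))   -- fuel guard; never reached under Pre_
      | fuel + 1 =>
        match pvPar tree curr with
        | none => (up ++ [(1, 0)], pos.insert 1 (up.length : Int))   -- Python raises; outside Pre_
        | some pw => pvWalkB tree fuel pw.1 (up ++ [(curr, pw.2)]) (pos.insert curr (up.length : Int))

-- dest walk of Source B: 'while curr not in pos' — stops at the first node on src's chain
def pvWalkDown (tree : List (Int × List (List Int))) (pos : PySem.Dict Int Int) :
    Nat → Int → List (Int × Int) → List (Int × Int) × Int
  | fuel, curr, down =>
    if pos.contains curr then (down, curr)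
    else
      match fuel with
      | 0 => (down, curr)        -- fuel guard; never reached under Pre_
      | fuel + 1 =>
        match pvPar tree curr with
        | none => (down, curr)   -- Python raises; outside Pre_
        | some pw => pvWalkDown tree pos fuel pw.1 (down ++ [(curr, pw.2)])

def min_power_tree_alt (src : Int) (dest : Int) (tree : List (Int × List (List Int))) : Int × List Int :=
  let r := pvWalkB tree (tree.length + 1) src [] PySem.Dict.empty
  let s := pvWalkDown tree r.2 (tree.length + 1) dest []
  let k := r.2.getD s.2 0        -- pos[curr]; present whenever the loop exited normally
  let nodes := (PySem.List.slice r.1 none (some (k + 1))).map Prod.fst ++ s.1.reverse.map Prod.fst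
  let ws := (PySem.List.slice r.1 none (some k)).map Prod.snd ++ s.1.map Prod.snd ++ [0]
  match PySem.List.max? ws (fun y => y) with
  | some m => (m, nodes)
  | none => (0, nodes)           -- unreachable: ws ends with 0

-- ===== PRECONDITION & SPEC =====
-- 'the while-loop from c terminates at the root without an error': at every step before reaching 1
-- the current node has a dict entry whose first row has both a parent and a weight. A walk that
-- returns to 1 at all visits pairwise-distinct nodes (the walk is deterministic, so a repeat is a
-- cycle and the loop never exits), hence at most tree.length steps: fuel tree.length + 1 loses nothing.
def pvReach (tree : List (Int × List (List Int))) : Nat → Int → Bool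
  | fuel, curr =>
    if curr = 1 then true
    else
      match fuel with
      | 0 => false
      | fuel + 1 =>
        match pvPar tree curr with
        | none => false
        | some pw => pvReach tree fuel pw.1

-- Pre_ is EXACTLY the set of inputs on which A returns: outside it A raises KeyError (a chain node
-- that is not a key and not 1) or IndexError (a value [] or a first row shorter than 2), or loops
-- forever (a parent cycle). It excludes no input on which A returns a value.
def Pre_min_power_tree (src : Int) (dest : Int) (tree : List (Int × List (List Int))) : Prop :=
  pvReach tree (tree.length + 1) src = true ∧ pvReach tree (tree.length + 1) dest = true
instance (src : Int) (dest : Int) (tree : List (Int × List (List Int))) : Decidable (Pre_min_power_tree src dest tree) := by unfold Pre_min_power_tree; infer_instance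

def pvWitness_min_power_tree : Int × Int × (List (Int × List (List Int))) :=
  (4, 5, [(2, [[1, 3]]), (3, [[2, 7]]), (4, [[2, 2]]), (5, [[3, 4]])])

def Spec_min_power_tree (src : Int) (dest : Int) (tree : List (Int × List (List Int))) (out : Int × List Int) : Prop := out = min_power_tree_alt src dest tree
instance (src : Int) (dest : Int) (tree : List (Int × List (List Int))) (out : Int × List Int) : Decidable (Spec_min_power_tree src dest tree out) := by unfold Spec_min_power_tree; infer_instance

-- ===== CLAIM (what is proved, stated in full; the proofs are below) =====
def Claim_equal_min_power_tree : Prop := ∀ (src : Int) (dest : Int) (tree : List (Int × List (List Int))), Dom_min_power_tree src dest tree → Pre_min_power_tree src dest tree → Spec_min_power_tree src dest tree (min_power_tree src dest tree)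

-- ===== LEMMAS AND PROOFS =====

lemma pvReach_mono {tree : List (Int × List (List Int))} :
    ∀ (f : Nat) (c : Int), pvReach tree f c = true → ∀ g, f ≤ g → pvReach tree g c = true := by
  intro f
  induction f with
  | zero =>
    intro c h g _
    rw [pvReach.eq_def] at h
    by_cases hc : c = 1
    · subst hc; rw [pvReach.eq_def]; simp
    · simp [hc] at h
  | succ f ih =>
    intro c h g hfg
    by_cases hc : c = 1
    · subst hc; rw [pvReach.eq_def]; simp
    · rw [pvReach.eq_def] at h
      simp only [hc, if_false] at h
      obtain ⟨g', rfl⟩ : ∃ g', g = g' + 1 := ⟨g - 1, by omega⟩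
      rw [pvReach.eq_def]
      simp only [hc, if_false]
      cases hp : pvPar tree c with
      | none => rw [hp] at h; exact h
      | some pw => rw [hp] at h; exact ih pw.1 h g' (by omega)

lemma pvWalkA_indep {tree : List (Int × List (List Int))} :
    ∀ (f : Nat) (c : Int), pvReach tree f c = true → ∀ g, pvReach tree g c = true →
      pvWalkA tree g c = pvWalkA tree f c := by
  intro f
  induction f with
  | zero =>
    intro c h g _
    rw [pvReach.eq_def] at h
    by_cases hc : c = 1
    · subst hc; simp [pvWalkA.eq_def]
    · simp [hc] at h
  | succ f ih =>
    intro c h g hg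
    by_cases hc : c = 1
    · subst hc; simp [pvWalkA.eq_def]
    · obtain ⟨g', rfl⟩ : ∃ g', g = g' + 1 := by
        cases g with
        | zero => rw [pvReach.eq_def] at hg; simp [hc] at hg
        | succ g' => exact ⟨g', rfl⟩
      rw [pvReach.eq_def] at h hg
      simp only [hc, if_false] at h hg
      rw [pvWalkA.eq_def, pvWalkA.eq_def]
      simp only [hc, if_false]
      cases hp : pvPar tree c with
      | none => simp [hp] at h
      | some pw =>
        rw [hp] at h hg
        simp only at h hg ⊢
        rw [ih pw.1 h g' hg]

lemma pvWalkA_one (tree : List (Int × List (List Int))) (f : Nat) :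
    pvWalkA tree f 1 = [(1, 0)] := by
  rw [pvWalkA.eq_def]; simp

-- one unfolding step at a non-root node under Reach
lemma pvReach_step {tree : List (Int × List (List Int))} {f : Nat} {c : Int}
    (h : pvReach tree (f + 1) c = true) (hc : c ≠ 1) :
    ∃ pw, pvPar tree c = some pw ∧ pvReach tree f pw.1 = true ∧
      pvWalkA tree (f + 1) c = (c, pw.2) :: pvWalkA tree f pw.1 := by
  rw [pvReach.eq_def] at h
  simp only [hc, if_false] at h
  cases hp : pvPar tree c with
  | none => rw [hp] at h; simp at h
  | some pw =>
    rw [hp] at h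
    refine ⟨pw, rfl, h, ?_⟩
    rw [pvWalkA.eq_def]
    simp [hc, hp]

lemma pvWalkA_suffix {tree : List (Int × List (List Int))} :
    ∀ (f : Nat) (c : Int), pvReach tree f c = true → ∀ v w, (v, w) ∈ pvWalkA tree f c →
      ∃ pre f', f' ≤ f ∧ pvReach tree f' v = true ∧
        pvWalkA tree f c = pre ++ pvWalkA tree f' v := by
  intro f
  induction f with
  | zero =>
    intro c h v w hm
    rw [pvReach.eq_def] at h
    by_cases hc : c = 1
    · subst hc
      rw [pvWalkA_one] at hm ⊢
      simp at hm
      obtain ⟨rfl, rfl⟩ := hm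
      exact ⟨[], 0, le_refl _, by rw [pvReach.eq_def]; simp, by rw [pvWalkA_one]; simp⟩
    · simp [hc] at h
  | succ f ih =>
    intro c h v w hm
    by_cases hc : c = 1
    · subst hc
      rw [pvWalkA_one] at hm ⊢
      simp at hm
      obtain ⟨rfl, rfl⟩ := hm
      exact ⟨[], f + 1, le_refl _, by rw [pvReach.eq_def]; simp, by rw [pvWalkA_one]; simp⟩
    · obtain ⟨pw, hp, hr, hun⟩ := pvReach_step h hc
      rw [hun] at hm
      rcases List.mem_cons.1 hm with heq | hmem
      · have hv : v = c := congrArg Prod.fst heq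
        subst hv
        exact ⟨[], f + 1, le_refl _, h, by simp⟩
      · obtain ⟨pre, f', hle, hr', hsp⟩ := ih pw.1 hr v w hmem
        exact ⟨(c, pw.2) :: pre, f', by omega, hr', by rw [hun, hsp]; rfl⟩

lemma pvWalkA_nodup {tree : List (Int × List (List Int))} :
    ∀ (f : Nat) (c : Int), pvReach tree f c = true →
      ((pvWalkA tree f c).map Prod.fst).Nodup := by
  intro f
  induction f with
  | zero =>
    intro c h
    rw [pvReach.eq_def] at h
    by_cases hc : c = 1
    · subst hc; rw [pvWalkA_one]; simp
    · simp [hc] at h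
  | succ f ih =>
    intro c h
    by_cases hc : c = 1
    · subst hc; rw [pvWalkA_one]; simp
    · obtain ⟨pw, hp, hr, hun⟩ := pvReach_step h hc
      rw [hun]
      simp only [List.map_cons, List.nodup_cons]
      refine ⟨?_, ih pw.1 hr⟩
      intro hmem
      obtain ⟨x, hx, hxf⟩ := List.mem_map.1 hmem
      obtain ⟨pre, f', hle, hr', hsp⟩ :=
        pvWalkA_suffix f pw.1 hr c x.2 (by cases x; simp_all)
      have hwc : pvWalkA tree f' c = pvWalkA tree (f + 1) c :=
        pvWalkA_indep (f + 1) c h f' hr'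
      have hlen : (pvWalkA tree (f + 1) c).length =
          1 + pre.length + (pvWalkA tree (f + 1) c).length := by
        conv_lhs => rw [hun, hsp, hwc]
        simp
        omega
      omega

lemma pvWalkA_root_mem {tree : List (Int × List (List Int))} :
    ∀ (f : Nat) (c : Int), pvReach tree f c = true → (1, 0) ∈ pvWalkA tree f c := by
  intro f
  induction f with
  | zero =>
    intro c h
    rw [pvReach.eq_def] at h
    by_cases hc : c = 1
    · subst hc; rw [pvWalkA_one]; simp
    · simp [hc] at h
  | succ f ih =>
    intro c h
    by_cases hc : c = 1
    · subst hc; rw [pvWalkA_one]; simp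
    · obtain ⟨pw, _, hr, hun⟩ := pvReach_step h hc
      rw [hun]
      exact List.mem_cons_of_mem _ (ih pw.1 hr)

lemma pvWalkA_head {tree : List (Int × List (List Int))} {f : Nat} {c : Int}
    (h : pvReach tree f c = true) : ∃ w t, pvWalkA tree f c = (c, w) :: t := by
  by_cases hc : c = 1
  · subst hc; exact ⟨0, [], pvWalkA_one tree f⟩
  · rw [pvReach.eq_def] at h
    simp only [hc, if_false] at h
    cases f with
    | zero => simp at h
    | succ f =>
      obtain ⟨pw, _, _, hun⟩ := pvReach_step (by rw [pvReach.eq_def]; simp only [hc, if_false]; exact h) hc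
      exact ⟨pw.2, _, hun⟩

def pvPosAll (pos : PySem.Dict Int Int) (base : Nat) : List (Int × Int) → PySem.Dict Int Int
  | [] => pos
  | x :: t => pvPosAll (pos.insert x.1 (base : Int)) (base + 1) t

lemma pvWalkB_eq_chain {tree : List (Int × List (List Int))} :
    ∀ (f : Nat) (c : Int), pvReach tree f c = true → ∀ up pos,
      pvWalkB tree f c up pos =
        (up ++ pvWalkA tree f c, pvPosAll pos up.length (pvWalkA tree f c)) := by
  intro f
  induction f with
  | zero =>
    intro c h up pos
    rw [pvReach.eq_def] at h
    by_cases hc : c = 1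
    · subst hc
      rw [pvWalkA_one, pvWalkB]
      simp [pvPosAll]
    · simp [hc] at h
  | succ f ih =>
    intro c h up pos
    by_cases hc : c = 1
    · subst hc
      rw [pvWalkA_one, pvWalkB]
      simp [pvPosAll]
    · obtain ⟨pw, hp, hr, hun⟩ := pvReach_step h hc
      rw [pvWalkB]
      simp only [hc, if_false, hp]
      rw [ih pw.1 hr, hun]
      simp [pvPosAll, List.append_assoc]

lemma pvPosAll_contains (x : Int) :
    ∀ (ch : List (Int × Int)) (pos : PySem.Dict Int Int) (base : Nat),
      (pvPosAll pos base ch).contains x = (pos.contains x || decide (x ∈ ch.map Prod.fst)) := by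
  intro ch
  induction ch with
  | nil => intro pos base; simp [pvPosAll]
  | cons a t ih =>
    intro pos base
    rw [pvPosAll, ih, PySem.Dict.contains_insert]
    by_cases h1 : x = a.1 <;> by_cases h2 : x ∈ List.map Prod.fst t <;> simp [h1, h2]

lemma pvPosAll_getD_not_mem {v : Int} :
    ∀ (ch : List (Int × Int)) (pos : PySem.Dict Int Int) (base : Nat),
      v ∉ ch.map Prod.fst → (pvPosAll pos base ch).getD v 0 = pos.getD v 0 := by
  intro ch
  induction ch with
  | nil => intro pos base _; rfl
  | cons a t ih =>
    intro pos base h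
    simp only [List.map_cons, List.mem_cons, not_or] at h
    rw [pvPosAll, ih _ _ h.2, PySem.Dict.getD_insert]
    simp [h.1]

lemma pvPosAll_getD {v : Int} :
    ∀ (pre suf : List (Int × Int)) (w : Int × Int) (pos : PySem.Dict Int Int) (base : Nat),
      w.1 = v → v ∉ pre.map Prod.fst → v ∉ suf.map Prod.fst →
      (pvPosAll pos base (pre ++ w :: suf)).getD v 0 = ((base + pre.length : Nat) : Int) := by
  intro pre
  induction pre with
  | nil =>
    intro suf w pos base hw _ hsuf
    rw [List.nil_append, pvPosAll, pvPosAll_getD_not_mem _ _ _ hsuf, hw,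
      PySem.Dict.getD_insert_self]
    simp
  | cons a pre' ih =>
    intro suf w pos base hw hpre hsuf
    simp only [List.map_cons, List.mem_cons, not_or] at hpre
    rw [List.cons_append, pvPosAll, ih suf w _ _ hw hpre.2 hsuf]
    simp only [List.length_cons]
    congr 1
    omega

lemma pvWalkDown_spec {tree : List (Int × List (List Int))}
    (P : PySem.Dict Int Int) (S : List (Int × Int))
    (hP : ∀ x : Int, P.contains x = decide (x ∈ S.map Prod.fst)) (h1 : (1 : Int) ∈ S.map Prod.fst) :
    ∀ (f : Nat) (c : Int), pvReach tree f c = true → ∀ down,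
      ∃ pre v f', f' ≤ f ∧ pvReach tree f' v = true ∧
        pvWalkDown tree P f c down = (down ++ pre, v) ∧
        pvWalkA tree f c = pre ++ pvWalkA tree f' v ∧
        (∀ x ∈ pre, x.1 ∉ S.map Prod.fst) ∧ v ∈ S.map Prod.fst := by
  intro f
  induction f with
  | zero =>
    intro c h down
    rw [pvReach.eq_def] at h
    by_cases hc : c = 1
    · subst hc
      refine ⟨[], 1, 0, le_refl _, by rw [pvReach.eq_def]; simp, ?_, by simp, by simp, h1⟩
      rw [pvWalkDown]
      simp [hP 1, h1]
    · simp [hc] at h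
  | succ f ih =>
    intro c h down
    by_cases hpc : P.contains c = true
    · have hcS : c ∈ S.map Prod.fst := by
        have := hP c
        rw [hpc] at this
        exact of_decide_eq_true this.symm
      refine ⟨[], c, f + 1, le_refl _, h, ?_, by simp, by simp, hcS⟩
      rw [pvWalkDown]
      simp [hpc]
    · have hcS : c ∉ S.map Prod.fst := by
        intro hmem
        exact hpc (by rw [hP c]; simp [hmem])
      have hc : c ≠ 1 := fun hh => hcS (hh ▸ h1)
      obtain ⟨pw, hp, hr, hun⟩ := pvReach_step h hc
      obtain ⟨pre', v, f', hle, hr', hrun, hsp, hnot, hvS⟩ := ih pw.1 hr (down ++ [(c, pw.2)])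
      refine ⟨(c, pw.2) :: pre', v, f', by omega, hr', ?_, ?_, ?_, hvS⟩
      · rw [pvWalkDown]
        simp only [Bool.not_eq_true] at hpc
        simp only [hpc, hp]
        rw [hrun]
        simp
      · rw [hun, hsp]; rfl
      · intro x hx
        rcases List.mem_cons.1 hx with hh | hh
        · subst hh; exact hcS
        · exact hnot x hh

lemma pvScan_main (S D Spre Dpre : List (Int × Int))
    (hd : ∀ x ∈ Dpre, x.1 ∉ S.map Prod.fst) :
    ∀ (T : List (Int × Int)) (f : Nat), T.length < f → ∀ U : List (Int × Int),
      S = Spre ++ (T ++ U) → D = Dpre ++ (T ++ U) →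
      pvScanA S D f ((Spre.length : Int) + (T.length : Int) - 1)
          ((Dpre.length : Int) + (T.length : Int) - 1) =
        ((Spre.length : Int) - 1, (Dpre.length : Int) - 1) := by
  intro T
  induction T using List.reverseRecOn with
  | nil =>
    intro f hf U hS hD
    obtain ⟨f', rfl⟩ : ∃ f', f = f' + 1 := ⟨f - 1, by omega⟩
    simp only [List.length_nil, Nat.cast_zero, add_zero]
    rw [pvScanA]
    rcases List.eq_nil_or_concat Spre with hsp | ⟨Spre', sl, rfl⟩
    · subst hsp; norm_num
    · rcases List.eq_nil_or_concat Dpre with hdp | ⟨Dpre', dl, rfl⟩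
      · subst hdp; norm_num
      · simp only [List.concat_eq_append] at hS hD hd ⊢
        have hi : ((Spre' ++ [sl]).length : Int) - 1 = ((Spre'.length : Nat) : Int) := by
          simp
        have hj : ((Dpre' ++ [dl]).length : Int) - 1 = ((Dpre'.length : Nat) : Int) := by
          simp
        have hS2 : S = Spre' ++ (sl :: U) := by rw [hS]; simp
        have hD2 : D = Dpre' ++ (dl :: U) := by rw [hD]; simp
        have hgs : PySem.List.pyGet? S ((Spre'.length : Nat) : Int) = some sl := by
          rw [hS2]; exact PySem.List.pyGet?_append_length ..
        have hgd : PySem.List.pyGet? D ((Dpre'.length : Nat) : Int) = some dl := by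
          rw [hD2]; exact PySem.List.pyGet?_append_length ..
        have hne : sl.1 ≠ dl.1 := by
          intro h
          apply hd dl (by simp)
          rw [← h, hS2]
          simp
        rw [hi, hj, hgs, hgd]
        have hcond : (0 : Int) ≤ ((Spre'.length : Nat) : Int) ∧ (0 : Int) ≤ ((Dpre'.length : Nat) : Int) := by
          constructor <;> positivity
        simp only [hcond, and_true, if_true, hne, if_false]
  | append_singleton T' t ih =>
    intro f hf U hS hD
    obtain ⟨f', rfl⟩ : ∃ f', f = f' + 1 := ⟨f - 1, by omega⟩
    rw [pvScanA]
    have hS2 : S = (Spre ++ T') ++ (t :: U) := by rw [hS]; simp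
    have hD2 : D = (Dpre ++ T') ++ (t :: U) := by rw [hD]; simp
    have hi : (Spre.length : Int) + ((T' ++ [t]).length : Int) - 1 =
        (((Spre ++ T').length : Nat) : Int) := by
      simp only [List.length_append, List.length_cons, List.length_nil]
      push_cast
      omega
    have hj : (Dpre.length : Int) + ((T' ++ [t]).length : Int) - 1 =
        (((Dpre ++ T').length : Nat) : Int) := by
      simp only [List.length_append, List.length_cons, List.length_nil]
      push_cast
      omega
    have hgs : PySem.List.pyGet? S (((Spre ++ T').length : Nat) : Int) = some t := by
      rw [hS2]; exact PySem.List.pyGet?_append_length ..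
    have hgd : PySem.List.pyGet? D (((Dpre ++ T').length : Nat) : Int) = some t := by
      rw [hD2]; exact PySem.List.pyGet?_append_length ..
    rw [hi, hj, hgs, hgd]
    have hcond : (0 : Int) ≤ (((Spre ++ T').length : Nat) : Int) ∧
        (0 : Int) ≤ (((Dpre ++ T').length : Nat) : Int) := by
      constructor <;> positivity
    simp only [hcond, if_true]
    have hi2 : (((Spre ++ T').length : Nat) : Int) - 1 = (Spre.length : Int) + (T'.length : Int) - 1 := by
      simp
    have hj2 : (((Dpre ++ T').length : Nat) : Int) - 1 = (Dpre.length : Int) + (T'.length : Int) - 1 := by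
      simp
    rw [hi2, hj2]
    exact ih f' (by simp at hf ⊢; omega) (t :: U) (by rw [hS]; simp) (by rw [hD]; simp)

lemma pvMax_perm (xs ys : List Int) (h : xs.Perm ys) :
    PySem.List.max? xs (fun y => y) = PySem.List.max? ys (fun y => y) := by
  cases hxa : PySem.List.max? xs (fun y => y) with
  | none =>
    rw [PySem.List.max?_eq_none_iff] at hxa
    subst hxa
    have : ys = [] := List.eq_nil_of_length_eq_zero (by simpa using h.length_eq.symm)
    subst this
    rfl
  | some a =>
    cases hyb : PySem.List.max? ys (fun y => y) with
    | none =>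
      rw [PySem.List.max?_eq_none_iff] at hyb
      subst hyb
      have hx : xs = [] := List.eq_nil_of_length_eq_zero (by simpa using h.length_eq)
      subst hx
      have hnone : PySem.List.max? ([] : List Int) (fun y => y) = none := by
        rw [PySem.List.max?_eq_none_iff]
      cases hnone.symm.trans hxa
    | some b =>
      have ha := PySem.List.max?_mem hxa
      have hb := PySem.List.max?_mem hyb
      have hamax := PySem.List.max?_isMax hxa
      have hbmax := PySem.List.max?_isMax hyb
      have hab : a ≤ b := hbmax a (h.mem_iff.1 ha)
      have hba : b ≤ a := hamax b (h.mem_iff.2 hb)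
      rw [le_antisymm hab hba]

-- ===== VERDICT (by name: the statement is the Claim_ definition above) =====
theorem min_power_tree_spec : Claim_equal_min_power_tree := by
  unfold Claim_equal_min_power_tree
  intro src dest tree _ hpre
  unfold Spec_min_power_tree
  obtain ⟨hRS, hRD⟩ := hpre
  set F := tree.length + 1 with hF
  have hWB := pvWalkB_eq_chain F src hRS [] PySem.Dict.empty
  have hP : ∀ x : Int, (pvPosAll PySem.Dict.empty 0 (pvWalkA tree F src)).contains x =
      decide (x ∈ (pvWalkA tree F src).map Prod.fst) := by
    intro x
    rw [pvPosAll_contains, PySem.Dict.contains_empty]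
    simp
  have h1S : (1 : Int) ∈ (pvWalkA tree F src).map Prod.fst :=
    List.mem_map.2 ⟨(1, 0), pvWalkA_root_mem F src hRS, rfl⟩
  obtain ⟨Dpre, v, fv, hfv, hRv, hrun, hDsplit, hnot, hvS⟩ :=
    pvWalkDown_spec (pvPosAll PySem.Dict.empty 0 (pvWalkA tree F src)) (pvWalkA tree F src)
      hP h1S F dest hRD []
  have hRvF : pvReach tree F v = true := pvReach_mono fv v hRv F (by omega)
  have hvchain : pvWalkA tree fv v = pvWalkA tree F v := by
    rw [pvWalkA_indep fv v hRv F hRvF]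
  rw [hvchain] at hDsplit
  obtain ⟨x, hxmem, hxfst⟩ := List.mem_map.1 hvS
  have hvmem : (v, x.2) ∈ pvWalkA tree F src := by
    have hx : (v, x.2) = x := by cases x; simp_all
    rw [hx]; exact hxmem
  obtain ⟨Spre, fv2, _, hRv2, hSsplit⟩ := pvWalkA_suffix F src hRS v x.2 hvmem
  have hv2chain : pvWalkA tree fv2 v = pvWalkA tree F v := by
    rw [pvWalkA_indep fv2 v hRv2 F hRvF]
  rw [hv2chain] at hSsplit
  obtain ⟨wv, T1, hT⟩ := pvWalkA_head hRvF
  have hnd : ((pvWalkA tree F src).map Prod.fst).Nodup := pvWalkA_nodup F src hRS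
  have hnd2 : (Spre.map Prod.fst ++ v :: T1.map Prod.fst).Nodup := by
    simpa [hSsplit, hT] using hnd
  have hndp := List.nodup_append.1 hnd2
  have hvT1 : v ∉ T1.map Prod.fst := (List.nodup_cons.1 hndp.2.1).1
  have hvSpre : v ∉ Spre.map Prod.fst := by
    intro h
    exact hndp.2.2 v h v (List.mem_cons_self ..) rfl
  have hTlen : (pvWalkA tree F v).length ≤ (pvWalkA tree F src).length := by
    rw [hSsplit]; simp
  have hscan := pvScan_main (pvWalkA tree F src) (pvWalkA tree F dest) Spre Dpre hnot
    (pvWalkA tree F v) ((pvWalkA tree F src).length + 1) (by omega) []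
    (by rw [hSsplit]; simp) (by rw [hDsplit]; simp)
  have hlenS : ((pvWalkA tree F src).length : Int) - 1 =
      (Spre.length : Int) + ((pvWalkA tree F v).length : Int) - 1 := by
    rw [hSsplit]; simp [List.length_append]
  have hlenD : ((pvWalkA tree F dest).length : Int) - 1 =
      (Dpre.length : Int) + ((pvWalkA tree F v).length : Int) - 1 := by
    rw [hDsplit]; simp [List.length_append]
  have h2 : ((Spre.length : Int) - 1) + 2 = ((Spre.length + 1 : Nat) : Int) := by push_cast; ring
  have h1 : ((Spre.length : Int) - 1) + 1 = ((Spre.length : Nat) : Int) := by omega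
  have h3 : ((Dpre.length : Int) - 1) + 1 = ((Dpre.length : Nat) : Int) := by omega
  have htake1 : (pvWalkA tree F src).take (Spre.length + 1) = Spre ++ [(v, wv)] := by
    rw [hSsplit, hT]; simp [List.take_append]
  have htakeS : (pvWalkA tree F src).take Spre.length = Spre := by
    rw [hSsplit]; exact List.take_left
  have htakeD : (pvWalkA tree F dest).take Dpre.length = Dpre := by
    rw [hDsplit]; exact List.take_left
  have hset : (Spre ++ [(v, wv)]).set Spre.length ((v, wv).1, 0) = Spre ++ [(v, 0)] := by
    simp
  have hk : (pvPosAll PySem.Dict.empty 0 (pvWalkA tree F src)).getD v 0 =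
      ((Spre.length : Nat) : Int) := by
    rw [hSsplit, hT]
    have := pvPosAll_getD Spre T1 (v, wv) PySem.Dict.empty 0 rfl hvSpre hvT1
    simpa using this
  have hk1 : ((Spre.length : Nat) : Int) + 1 = ((Spre.length + 1 : Nat) : Int) := by push_cast; ring
  have hmax : PySem.List.max? (((Spre ++ [(v, 0)]) ++ Dpre.reverse).map Prod.snd) (fun y => y) =
      PySem.List.max? (Spre.map Prod.snd ++ Dpre.map Prod.snd ++ [0]) (fun y => y) := by
    apply pvMax_perm
    rw [List.perm_iff_count]
    intro a
    simp only [List.map_append, List.map_reverse, List.count_append, List.count_reverse,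
      List.map_cons, List.map_nil]
    omega
  have hnodes : ((Spre ++ [(v, 0)]) ++ Dpre.reverse).map Prod.fst =
      (Spre ++ [(v, wv)]).map Prod.fst ++ Dpre.reverse.map Prod.fst := by
    simp
  simp only [min_power_tree, min_power_tree_alt, ← hF, hWB, List.nil_append,
    List.length_nil, hrun, hlenS, hlenD, hscan, h2, h1, h3, PySem.List.slice_to_natCast,
    htake1, htakeS, htakeD, PySem.List.pyGet?_append_length, PySem.List.pySetD_natCast,
    hset, hk, hk1, hmax, hnodes]
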